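-- pv_equiv track=rewrite | github.com/hscspring/pnlp | pnlp/penh.py | insert_sampling
-- ===== SOURCE A (Python) =====
-- from typing import List, Dict, Callable, Tuple, Optional
--
-- def insert_sampling(
--
--     token_list: List[str or Tuple[str, str]],
--     sample_idx: List[int]
-- ) -> List[str or Tuple[str, str]]:
--     """Simple insert sampling. Insert the tokens in the given indexes.
--     """
--     result = []
--     for i, token in enumerate(token_list):
--         if i in sample_idx:
--             result.append(token)
--         result.append(token)
--     return result
-- ===== SOURCE B (Python) =====
-- def insert_sampling(token_list, sample_idx):
--     """Copy the list, then insert a duplicate of each sampled token directly,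
--     walking the in-range sampled indexes from largest to smallest."""
--     n = len(token_list)
--     idxs = sorted({j for j in sample_idx if 0 <= j < n}, reverse=True)
--     result = list(token_list)
--     for j in idxs:
--         result.insert(j, token_list[j])
--     return result
-- ===== Notes on version B (the rewrite author's own statement) =====
-- stated objective: faster
-- what changed: A scans sample_idx once per token (membership test inside the loop); B instead deduplicates the in-range sampled indexes once into a sorted set and inserts each duplicate directly into a copy of the list, walking the indexes largest-first so no offset bookkeeping is needed.
import Mathlib
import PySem

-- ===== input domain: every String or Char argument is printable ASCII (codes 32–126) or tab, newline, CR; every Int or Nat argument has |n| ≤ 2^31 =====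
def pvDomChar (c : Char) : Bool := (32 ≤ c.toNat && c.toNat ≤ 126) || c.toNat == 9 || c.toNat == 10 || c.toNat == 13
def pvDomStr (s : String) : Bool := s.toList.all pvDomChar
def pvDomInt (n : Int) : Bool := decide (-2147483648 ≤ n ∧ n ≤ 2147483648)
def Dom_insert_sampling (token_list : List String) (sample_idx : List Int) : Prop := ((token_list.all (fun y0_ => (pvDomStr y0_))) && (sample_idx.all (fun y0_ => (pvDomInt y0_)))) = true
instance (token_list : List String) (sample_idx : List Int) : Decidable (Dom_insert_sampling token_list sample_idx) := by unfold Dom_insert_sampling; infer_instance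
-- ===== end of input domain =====

-- B duplicates sampled tokens by inserting into a copy of the list (largest index first) instead of A's
-- membership-tested pass over the tokens; objective: alternative decomposition, same result.

-- ===== PORT A =====
def insert_sampling (token_list : List String) (sample_idx : List Int) : List String :=
  (PySem.List.enumerate token_list).foldl
    (fun result p =>
      (if p.1 ∈ sample_idx then result ++ [p.2] else result) ++ [p.2]) []

-- ===== PORT B =====
-- token_list[j] is in range by construction of idxs, so pyGetD with a dummy default is exact here.
def insert_sampling_alt (token_list : List String) (sample_idx : List Int) : List String :=
  let n : Int := token_list.length
  let idxs := PySem.List.sorted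
    (PySem.Set.ofList (sample_idx.filter (fun j => decide (0 ≤ j) && decide (j < n))))
    (fun x => x) true
  idxs.foldl (fun result j => PySem.List.insert result j (PySem.List.pyGetD token_list j "")) token_list

-- ===== PRECONDITION & SPEC =====
def Spec_insert_sampling (token_list : List String) (sample_idx : List Int) (out : List String) : Prop := out = insert_sampling_alt token_list sample_idx
instance (token_list : List String) (sample_idx : List Int) (out : List String) : Decidable (Spec_insert_sampling token_list sample_idx out) := by unfold Spec_insert_sampling; infer_instance

-- ===== CLAIM (what is proved, stated in full; the proofs are below) =====
def Claim_equal_insert_sampling : Prop := ∀ (token_list : List String) (sample_idx : List Int), Dom_insert_sampling token_list sample_idx → Spec_insert_sampling token_list sample_idx (insert_sampling token_list sample_idx)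

-- ===== LEMMAS AND PROOFS =====

-- reference function: duplicate the token at (absolute) position i when i ∈ s
def dupMem (s : List Int) : Int → List String → List String
  | _, [] => []
  | i, t :: ts => (if i ∈ s then [t, t] else [t]) ++ dupMem s (i + 1) ts

theorem dupMem_congr (s s' : List Int) : ∀ (ts : List String) (i : Int),
    (∀ k : Int, i ≤ k → k < i + ts.length → (k ∈ s ↔ k ∈ s')) →
    dupMem s i ts = dupMem s' i ts := by
  intro ts
  induction ts with
  | nil => intro i _; rfl
  | cons t ts ih =>
    intro i h
    have hi : (i ∈ s) = (i ∈ s') := by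
      simp only [eq_iff_iff]
      exact h i le_rfl (by simp only [List.length_cons]; push_cast; omega)
    simp only [dupMem, hi]
    rw [ih (i + 1) (fun k hk1 hk2 => h k (by omega)
      (by simp only [List.length_cons] at *; push_cast at hk2 ⊢; omega))]

theorem dupMem_take_drop (F : List Int) : ∀ (m : Nat) (ts : List String) (i : Int),
    (∀ x ∈ F, i + m ≤ x) →
    dupMem F i ts = ts.take m ++ dupMem F (i + m) (ts.drop m) := by
  intro m
  induction m with
  | zero => intro ts i _; simp
  | succ m ih =>
    intro ts i h
    cases ts with
    | nil => simp [dupMem]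
    | cons t ts =>
      have hni : i ∉ F := fun hmem => by have := h i hmem; omega
      simp only [dupMem, if_neg hni, List.take_succ_cons, List.drop_succ_cons,
        List.cons_append]
      rw [ih ts (i + 1) (fun x hx => by have := h x hx; push_cast at this ⊢; omega)]
      have hc : i + 1 + (m : Int) = i + ((m + 1 : Nat) : Int) := by push_cast; ring
      rw [hc]
      simp

theorem foldl_A (sample_idx : List Int) : ∀ (ts : List String) (i : Int) (acc : List String),
    (PySem.List.enumerate ts i).foldl
      (fun result p => (if p.1 ∈ sample_idx then result ++ [p.2] else result) ++ [p.2]) acc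
    = acc ++ dupMem sample_idx i ts := by
  intro ts
  induction ts with
  | nil => intro i acc; simp [PySem.List.enumerate_nil, dupMem]
  | cons t ts ih =>
    intro i acc
    rw [PySem.List.enumerate_cons]
    simp only [List.foldl_cons]
    rw [ih (i + 1)]
    by_cases h : i ∈ sample_idx <;> simp [dupMem, h]

theorem foldr_insert_eq_dupMem : ∀ (F : List Int) (ts : List String),
    F.Pairwise (· < ·) → (∀ j ∈ F, 0 ≤ j ∧ j < (ts.length : Int)) →
    F.foldr (fun j res => PySem.List.insert res j (PySem.List.pyGetD ts j "")) ts
      = dupMem F 0 ts := by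
  intro F
  induction F with
  | nil =>
    intro ts _ _
    simp only [List.foldr_nil]
    rw [dupMem_take_drop [] ts.length ts 0 (by simp)]
    simp [dupMem]
  | cons j F ih =>
    intro ts hpw hrange
    obtain ⟨hj0, hjlt⟩ := hrange j (List.mem_cons_self ..)
    obtain ⟨m, rfl⟩ : ∃ m : Nat, j = (m : Int) := ⟨j.toNat, by omega⟩
    have hpw' : F.Pairwise (· < ·) := hpw.of_cons
    have hgt : ∀ x ∈ F, (m : Int) < x := fun x hx => List.rel_of_pairwise_cons hpw hx
    have hmlt : m < ts.length := by omega
    simp only [List.foldr_cons]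
    rw [ih ts hpw' (fun x hx => ⟨by have := hgt x hx; omega,
        (hrange x (List.mem_cons_of_mem _ hx)).2⟩)]
    -- split the inner dupMem after position m+1 (all of F lies beyond it)
    rw [dupMem_take_drop F (m + 1) ts 0
        (fun x hx => by have := hgt x hx; push_cast; omega)]
    have hvel : PySem.List.pyGetD ts (m : Int) "" = ts[m] := by
      rw [PySem.List.pyGetD_natCast]
      exact List.getD_eq_getElem _ _ hmlt
    have hlen : m ≤ (ts.take (m + 1) ++ dupMem F (0 + ((m + 1 : Nat) : Int)) (ts.drop (m + 1))).length := by
      simp [List.length_take, List.length_append]; omega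
    rw [hvel, PySem.List.insert_natCast _ m _ hlen]
    have hdrop : List.drop m ts = ts[m] :: List.drop (m + 1) ts := List.drop_eq_getElem_cons hmlt
    have htk : (ts.take (m + 1) ++ dupMem F (0 + ((m + 1 : Nat) : Int)) (ts.drop (m + 1))).take m
        = ts.take m := by
      rw [List.take_append_of_le_length (by simp [List.length_take]; omega)]
      rw [List.take_take]; congr 1; omega
    have hdr : (ts.take (m + 1) ++ dupMem F (0 + ((m + 1 : Nat) : Int)) (ts.drop (m + 1))).drop m
        = ts[m] :: dupMem F (0 + ((m + 1 : Nat) : Int)) (ts.drop (m + 1)) := by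
      rw [List.drop_append_of_le_length (by simp [List.length_take]; omega)]
      have h1 : m + 1 - m = 1 := by omega
      rw [List.drop_take, h1, hdrop, List.take_succ_cons, List.take_zero]
      simp only [List.singleton_append]
    rw [htk, hdr]
    -- now the RHS
    rw [dupMem_take_drop ((m : Int) :: F) m ts 0
        (fun x hx => by
          rcases List.mem_cons.mp hx with h | h
          · omega
          · have := hgt x h; omega)]
    rw [hdrop]
    have hmem : (0 + (m : Int)) ∈ ((m : Int) :: F) := by simp
    simp only [dupMem, if_pos hmem]
    rw [dupMem_congr ((m : Int) :: F) F (ts.drop (m + 1)) (0 + (m : Int) + 1)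
        (fun k hk1 hk2 => by
          simp only [List.mem_cons]
          constructor
          · rintro (rfl | h)
            · omega
            · exact h
          · exact fun h => Or.inr h)]
    simp only [List.cons_append, List.nil_append, List.append_cancel_left_eq]
    norm_cast

theorem insert_sampling_eq_dupMem (token_list : List String) (sample_idx : List Int) :
    insert_sampling token_list sample_idx = dupMem sample_idx 0 token_list := by
  unfold insert_sampling
  rw [foldl_A sample_idx token_list 0 []]
  simp

theorem insert_sampling_alt_eq_dupMem (token_list : List String) (sample_idx : List Int) :
    insert_sampling_alt token_list sample_idx = dupMem sample_idx 0 token_list := by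
  unfold insert_sampling_alt
  simp only []
  set n : Int := (token_list.length : Int) with hn
  set filt := sample_idx.filter (fun j => decide (0 ≤ j) && decide (j < n)) with hfilt
  set asc := PySem.List.sorted (PySem.Set.ofList filt) (fun x => x) false with hasc
  have hascpw : asc.Pairwise (· < ·) := PySem.List.sorted_ofList_pairwise_lt filt
  have hdesc : PySem.List.sorted (PySem.Set.ofList filt) (fun x => x) true = asc.reverse := by
    apply PySem.List.sorted_rev_eq_of_perm_of_pairwise_gt
    · exact (asc.reverse_perm).trans (PySem.List.sorted_perm ..)
    · exact (List.pairwise_reverse).mpr hascpw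
  rw [hdesc, List.foldl_reverse]
  have hmemasc : ∀ x, x ∈ asc ↔ (x ∈ sample_idx ∧ 0 ≤ x ∧ x < n) := by
    intro x
    rw [hasc, PySem.List.mem_sorted, PySem.Set.mem_ofList, hfilt, List.mem_filter]
    simp
  rw [foldr_insert_eq_dupMem asc token_list hascpw
      (fun j hj => ⟨((hmemasc j).mp hj).2.1, ((hmemasc j).mp hj).2.2⟩)]
  apply dupMem_congr
  intro k hk1 hk2
  rw [hmemasc k]
  constructor
  · exact fun h => h.1
  · intro h
    exact ⟨h, by omega, by rw [hn]; omega⟩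

-- ===== VERDICT (by name: the statement is the Claim_ definition above) =====
theorem insert_sampling_spec : Claim_equal_insert_sampling := by
  intro token_list sample_idx _
  unfold Spec_insert_sampling
  rw [insert_sampling_eq_dupMem, insert_sampling_alt_eq_dupMem]
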